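-- pv_equiv track=rewrite | github.com/goncharovmikhail-eng/portfolio | migrator_mysql/utils/append_mysql_config.py | update_config_with_section
-- ===== SOURCE A (Python) =====
-- def update_config_with_section(content, section, config_entry):
--     """Обновляет содержимое конфигурационного файла новой секцией."""
--     new_content = []
--     inside_section = False
--     for line in content:
--         if line.strip().startswith("["):
--             inside_section = line.strip() == f"[{section}]"
--         if inside_section:
--             continue
--         new_content.append(line)
--     new_content.append(config_entry)
--     return new_content
-- ===== SOURCE B (Python) =====
-- def update_config_with_section(content, section, config_entry):
--     """Обновляет содержимое конфигурационного файла новой секцией."""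
--     # Partition into a header-less preamble group plus one group per section,
--     # then keep every group except the one headed by [section].
--     groups = []
--     cur = []
--     for line in content:
--         if line.strip().startswith("["):
--             groups.append(cur)
--             cur = [line]
--         else:
--             cur.append(line)
--     groups.append(cur)
--     header = f"[{section}]"
--     result = []
--     for g in groups:
--         if g and g[0].strip() == header:
--             continue
--         result.extend(g)
--     result.append(config_entry)
--     return result
-- ===== Notes on version B (the rewrite author's own statement) =====
-- stated objective: alternative
-- what changed: Replaces the one-pass inside_section flag filter by a two-phase decomposition: first partition the lines into a preamble group plus one group per '['-header, then concatenate every group whose header is not [section] and append the new entry.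
import Mathlib
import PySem

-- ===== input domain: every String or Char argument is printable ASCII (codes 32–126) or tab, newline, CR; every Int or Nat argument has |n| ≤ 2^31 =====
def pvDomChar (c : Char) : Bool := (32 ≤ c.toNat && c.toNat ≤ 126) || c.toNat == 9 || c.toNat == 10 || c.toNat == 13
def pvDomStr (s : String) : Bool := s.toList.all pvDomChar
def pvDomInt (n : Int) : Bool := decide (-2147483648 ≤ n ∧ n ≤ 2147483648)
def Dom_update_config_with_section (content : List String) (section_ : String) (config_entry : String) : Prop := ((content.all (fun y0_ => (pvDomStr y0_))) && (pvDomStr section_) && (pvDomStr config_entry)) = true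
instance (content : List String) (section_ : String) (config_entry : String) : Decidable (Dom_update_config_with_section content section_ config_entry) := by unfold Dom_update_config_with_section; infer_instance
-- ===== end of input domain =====

-- B replaces A's one-pass inside_section-flag filter by a two-phase decomposition (partition
-- into header groups, then drop the [section] group); same behaviour, objective: alternative.

-- ===== PORT A =====
-- literal port of A: one foldl over content carrying (new_content, inside_section)
def update_config_with_section (content : List String) (section_ : String) (config_entry : String) : List String :=
  let st := content.foldl
    (fun (st : List String × Bool) line =>
      let inside :=
        if PySem.Str.startswith (PySem.Str.strip line) "[" then
          PySem.Str.strip line == ("[" ++ section_ ++ "]")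
        else st.2
      if inside then (st.1, inside) else (st.1 ++ [line], inside))
    ([], false)
  st.1 ++ [config_entry]

-- ===== PORT B =====
-- literal port of B: phase 1 groups the lines, phase 2 concatenates the kept groups
def update_config_with_section_alt (content : List String) (section_ : String) (config_entry : String) : List String :=
  let gc := content.foldl
    (fun (gc : List (List String) × List String) line =>
      if PySem.Str.startswith (PySem.Str.strip line) "[" then
        (gc.1 ++ [gc.2], [line])
      else
        (gc.1, gc.2 ++ [line]))
    ([], [])
  let groups := gc.1 ++ [gc.2]
  let header := "[" ++ section_ ++ "]"
  let result := groups.foldl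
    (fun (res : List String) g =>
      match g.head? with
      | some x => if PySem.Str.strip x == header then res else res ++ g
      | none => res ++ g)
    []
  result ++ [config_entry]

-- ===== PRECONDITION & SPEC =====
def Spec_update_config_with_section (content : List String) (section_ : String) (config_entry : String) (out : List String) : Prop := out = update_config_with_section_alt content section_ config_entry
instance (content : List String) (section_ : String) (config_entry : String) (out : List String) : Decidable (Spec_update_config_with_section content section_ config_entry out) := by unfold Spec_update_config_with_section; infer_instance

-- ===== CLAIM (what is proved, stated in full; the proofs are below) =====
def Claim_equal_update_config_with_section : Prop := ∀ (content : List String) (section_ : String) (config_entry : String), Dom_update_config_with_section content section_ config_entry → Spec_update_config_with_section content section_ config_entry (update_config_with_section content section_ config_entry)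


-- ===== LEMMAS AND PROOFS =====

-- is the stripped line a section header?
def pvIsHdr (l : String) : Bool := PySem.Str.startswith (PySem.Str.strip l) "["

-- will a group starting like `g` be skipped?
def pvSkip (hdr : String) (g : List String) : Bool :=
  match g.head? with
  | some x => PySem.Str.strip x == hdr
  | none => false

def pvKeep (hdr : String) (g : List String) : List String :=
  if pvSkip hdr g then [] else g

-- named copies of the ports' fold bodies (definitionally equal to the lambdas in the ports)
def pvAStep (section_ : String) (st : List String × Bool) (line : String) : List String × Bool :=
  let i := if pvIsHdr line then PySem.Str.strip line == ("[" ++ section_ ++ "]") else st.2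
  if i then (st.1, i) else (st.1 ++ [line], i)

def pvBStep1 (gc : List (List String) × List String) (line : String) : List (List String) × List String :=
  if pvIsHdr line then (gc.1 ++ [gc.2], [line]) else (gc.1, gc.2 ++ [line])

def pvBStep2 (hdr : String) (res : List String) (g : List String) : List String :=
  match g.head? with
  | some x => if PySem.Str.strip x == hdr then res else res ++ g
  | none => res ++ g

-- common recursive description of the lines A emits from flag state `inside`
def pvCore (hdr : String) : List String → Bool → List String
  | [], _ => []
  | l :: ls, inside =>
    let inside' := if pvIsHdr l then PySem.Str.strip l == hdr else inside
    (if inside' then [] else [l]) ++ pvCore hdr ls inside'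

-- B's output from pending group `cur` onwards
def pvG (hdr : String) : List String → List String → List String
  | [], cur => pvKeep hdr cur
  | l :: ls, cur =>
    if pvIsHdr l then pvKeep hdr cur ++ pvG hdr ls [l]
    else pvG hdr ls (cur ++ [l])

def pvFlt (hdr : String) (gs : List (List String)) : List String :=
  (gs.map (pvKeep hdr)).flatten

-- a line that does not look like a header cannot equal the "[section]" header
theorem pvNotHdr_ne (section_ l : String) (h : pvIsHdr l = false) :
    (PySem.Str.strip l == ("[" ++ section_ ++ "]")) = false := by
  apply beq_eq_false_iff_ne.mpr
  intro heq
  have : pvIsHdr l = true := by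
    unfold pvIsHdr
    rw [heq]
    simp only [PySem.Str.startswith_eq]
    refine (PySem.Chars.startswith_iff _ _).mpr ?_
    refine ⟨(section_.toList ++ "]".toList), ?_⟩
    simp [String.toList_append]
  simp [this] at h

-- A's foldl, characterised by pvCore
theorem pvA_fold (section_ : String) (ls : List String) :
    ∀ (acc : List String) (inside : Bool),
    (List.foldl (pvAStep section_) (acc, inside) ls).1
      = acc ++ pvCore ("[" ++ section_ ++ "]") ls inside := by
  induction ls with
  | nil => intro acc inside; simp [pvCore]
  | cons l ls ih =>
    intro acc inside
    rw [List.foldl_cons]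
    cases hi : (if pvIsHdr l then PySem.Str.strip l == ("[" ++ section_ ++ "]") else inside) with
    | true =>
      have hstep : pvAStep section_ (acc, inside) l = (acc, true) := by
        simp only [pvAStep]; rw [hi]; simp
      have hc : pvCore ("[" ++ section_ ++ "]") (l :: ls) inside
          = pvCore ("[" ++ section_ ++ "]") ls true := by
        simp only [pvCore]; rw [hi]; simp
      rw [hstep, hc, ih]
    | false =>
      have hstep : pvAStep section_ (acc, inside) l = (acc ++ [l], false) := by
        simp only [pvAStep]; rw [hi]; simp
      have hc : pvCore ("[" ++ section_ ++ "]") (l :: ls) inside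
          = l :: pvCore ("[" ++ section_ ++ "]") ls false := by
        simp only [pvCore]; rw [hi]; simp
      rw [hstep, hc, ih]
      simp

-- B's second foldl = pvFlt
theorem pvB_fold2 (hdr : String) (gs : List (List String)) :
    ∀ (res : List String), List.foldl (pvBStep2 hdr) res gs = res ++ pvFlt hdr gs := by
  induction gs with
  | nil => intro res; simp [pvFlt]
  | cons g gs ih =>
    intro res
    rw [List.foldl_cons]
    cases g with
    | nil =>
      have : pvBStep2 hdr res [] = res := by simp [pvBStep2]
      rw [this, ih]
      simp [pvFlt, pvKeep, pvSkip]
    | cons x xs =>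
      cases he : (PySem.Str.strip x == hdr) with
      | true =>
        have : pvBStep2 hdr res (x :: xs) = res := by simp only [pvBStep2, List.head?_cons]; rw [he]; simp
        rw [this, ih]
        simp [pvFlt, pvKeep, pvSkip, he]
      | false =>
        have : pvBStep2 hdr res (x :: xs) = res ++ (x :: xs) := by
          simp only [pvBStep2, List.head?_cons]; rw [he]; simp
        rw [this, ih]
        simp [pvFlt, pvKeep, pvSkip, he]

-- B's first foldl, characterised by pvG
theorem pvB_fold1 (hdr : String) (ls : List String) :
    ∀ (groups : List (List String)) (cur : List String),
    pvFlt hdr ((List.foldl pvBStep1 (groups, cur) ls).1 ++ [(List.foldl pvBStep1 (groups, cur) ls).2])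
      = pvFlt hdr groups ++ pvG hdr ls cur := by
  induction ls with
  | nil => intro groups cur; simp [pvG, pvFlt]
  | cons l ls ih =>
    intro groups cur
    rw [List.foldl_cons]
    cases hh : pvIsHdr l with
    | true =>
      have hstep : pvBStep1 (groups, cur) l = (groups ++ [cur], [l]) := by
        simp only [pvBStep1]; rw [hh]; simp
      have hg : pvG hdr (l :: ls) cur = pvKeep hdr cur ++ pvG hdr ls [l] := by
        simp only [pvG]; rw [hh]; simp
      rw [hstep, hg, ih]
      simp [pvFlt]
    | false =>
      have hstep : pvBStep1 (groups, cur) l = (groups, cur ++ [l]) := by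
        simp only [pvBStep1]; rw [hh]; simp
      have hg : pvG hdr (l :: ls) cur = pvG hdr ls (cur ++ [l]) := by
        simp only [pvG]; rw [hh]; simp
      rw [hstep, hg, ih]

-- bridge: pvG in terms of pvCore
theorem pvG_eq_core (section_ : String) (ls : List String) :
    ∀ (cur : List String),
    pvG ("[" ++ section_ ++ "]") ls cur
      = pvKeep ("[" ++ section_ ++ "]") cur
        ++ pvCore ("[" ++ section_ ++ "]") ls (pvSkip ("[" ++ section_ ++ "]") cur) := by
  induction ls with
  | nil => intro cur; simp [pvG, pvCore]
  | cons l ls ih =>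
    intro cur
    cases hh : pvIsHdr l with
    | true =>
      have hg : pvG ("[" ++ section_ ++ "]") (l :: ls) cur
          = pvKeep ("[" ++ section_ ++ "]") cur ++ pvG ("[" ++ section_ ++ "]") ls [l] := by
        simp only [pvG]; rw [hh]; simp
      rw [hg, ih [l]]
      have hskip : pvSkip ("[" ++ section_ ++ "]") [l]
          = (PySem.Str.strip l == ("[" ++ section_ ++ "]")) := by simp [pvSkip]
      have hc : pvCore ("[" ++ section_ ++ "]") (l :: ls) (pvSkip ("[" ++ section_ ++ "]") cur)
          = pvKeep ("[" ++ section_ ++ "]") [l]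
            ++ pvCore ("[" ++ section_ ++ "]") ls (pvSkip ("[" ++ section_ ++ "]") [l]) := by
        simp only [pvCore]; rw [hh]
        cases he : (PySem.Str.strip l == ("[" ++ section_ ++ "]")) with
        | true => rw [hskip, he]; simp [pvKeep, pvSkip, he]
        | false => rw [hskip, he]; simp [pvKeep, pvSkip, he]
      rw [hc]
    | false =>
      have hg : pvG ("[" ++ section_ ++ "]") (l :: ls) cur
          = pvG ("[" ++ section_ ++ "]") ls (cur ++ [l]) := by
        simp only [pvG]; rw [hh]; simp
      rw [hg, ih (cur ++ [l])]
      have hne := pvNotHdr_ne section_ l hh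
      have hc : pvCore ("[" ++ section_ ++ "]") (l :: ls) (pvSkip ("[" ++ section_ ++ "]") cur)
          = (if pvSkip ("[" ++ section_ ++ "]") cur then [] else [l])
            ++ pvCore ("[" ++ section_ ++ "]") ls (pvSkip ("[" ++ section_ ++ "]") cur) := by
        simp only [pvCore]; rw [hh]; simp
      rw [hc]
      cases cur with
      | nil =>
        have h1 : pvSkip ("[" ++ section_ ++ "]") ([] ++ [l]) = false := by
          simp [pvSkip, hne]
        have h0 : pvSkip ("[" ++ section_ ++ "]") ([] : List String) = false := by
          simp [pvSkip]
        rw [h1, h0]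
        simp [pvKeep, pvSkip, hne]
      | cons c cs =>
        have hsk : pvSkip ("[" ++ section_ ++ "]") (c :: (cs ++ [l]))
            = pvSkip ("[" ++ section_ ++ "]") (c :: cs) := by simp [pvSkip]
        simp only [List.cons_append]
        rw [hsk]
        cases hc2 : pvSkip ("[" ++ section_ ++ "]") (c :: cs) with
        | true => simp [pvKeep, hc2, hsk]
        | false => simp [pvKeep, hc2, hsk]

-- ===== VERDICT (by name: the statement is the Claim_ definition above) =====
theorem update_config_with_section_spec : Claim_equal_update_config_with_section := by
  intro content section_ config_entry _hdom
  unfold Spec_update_config_with_section update_config_with_section update_config_with_section_alt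
  show (List.foldl (pvAStep section_) ([], false) content).1 ++ [config_entry]
      = List.foldl (pvBStep2 ("[" ++ section_ ++ "]")) []
          ((List.foldl pvBStep1 ([], []) content).1 ++ [(List.foldl pvBStep1 ([], []) content).2])
        ++ [config_entry]
  rw [pvA_fold section_ content [] false,
    pvB_fold2 ("[" ++ section_ ++ "]"), pvB_fold1 ("[" ++ section_ ++ "]") content [] [],
    pvG_eq_core section_ content []]
  simp [pvFlt, pvKeep, pvSkip]
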